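-- pv_equiv track=rewrite | github.com/l00kingactual/l00kingactual | description_starting_00.py | arabic_to_egyptian
-- ===== SOURCE A (Python) =====
-- def arabic_to_egyptian(arabic_num):
--     egyptian_dict = {1: '|', 2: '||', 3: '|||', 4: '||||', 5: '-', 6: '-|', 7: '-||', 8: '-|||', 9: '-||||'}
--     egyptian_num = ''
--
--     for value in sorted(egyptian_dict.keys(), reverse=True):
--         while arabic_num >= value:
--             egyptian_num += egyptian_dict[value]
--             arabic_num -= value
--
--     return egyptian_num
--
-- egyptian_num = '||||'
-- ===== SOURCE B (Python) =====
-- def arabic_to_egyptian(arabic_num):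
--     if arabic_num < 1:
--         return ''
--     q, r = divmod(arabic_num, 9)
--     return '-||||' * q + ['', '|', '||', '|||', '||||', '-', '-|', '-||', '-|||'][r]
-- ===== Notes on version B (the rewrite author's own statement) =====
-- stated objective: faster
-- what changed: Replaces the greedy subtract-one-value-at-a-time loop (O(n) iterations) with a closed form: divmod(n, 9) gives the count of '-||||' blocks plus a table lookup for the remainder symbol.
import Mathlib
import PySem

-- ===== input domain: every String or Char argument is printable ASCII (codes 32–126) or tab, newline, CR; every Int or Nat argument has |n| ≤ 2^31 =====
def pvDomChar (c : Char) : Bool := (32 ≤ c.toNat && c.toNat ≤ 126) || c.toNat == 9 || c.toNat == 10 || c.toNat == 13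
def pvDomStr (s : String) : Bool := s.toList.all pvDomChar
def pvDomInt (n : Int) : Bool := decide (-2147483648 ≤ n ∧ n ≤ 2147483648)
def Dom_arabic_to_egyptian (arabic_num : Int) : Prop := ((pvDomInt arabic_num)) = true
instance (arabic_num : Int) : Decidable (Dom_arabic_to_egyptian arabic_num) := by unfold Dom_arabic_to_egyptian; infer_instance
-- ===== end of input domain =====

-- B replaces A's greedy repeated-subtraction loop by the closed form divmod(n, 9): asymptotically faster.

-- ===== PORT A =====
-- the literal dict {1:'|', …, 9:'-||||'}
def egyptDict : PySem.Dict Int String :=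
  PySem.Dict.ofList [(1, "|"), (2, "||"), (3, "|||"), (4, "||||"),
                     (5, "-"), (6, "-|"), (7, "-||"), (8, "-|||"), (9, "-||||")]

-- the inner 'while arabic_num >= value: egyptian_num += dict[value]; arabic_num -= value'.
-- fuel = n.toNat is a totality guard only: every key value is ≥ 1, so n.toNat iterations always suffice.
def egyptWhile (fuel : Nat) (value : Int) (sym : List Char) (acc : List Char) (n : Int) :
    List Char × Int :=
  match fuel with
  | 0 => (acc, n)
  | f + 1 => if value ≤ n then egyptWhile f value sym (acc ++ sym) (n - value) else (acc, n)

-- one iteration of the outer 'for value in sorted(keys, reverse=True)' loop;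
-- dict lookup via getD "": every looked-up value is a key, so the default is never used.
def egyptStep (st : List Char × Int) (value : Int) : List Char × Int :=
  egyptWhile st.2.toNat value (egyptDict.getD value "").toList st.1 st.2

def arabic_to_egyptian (arabic_num : Int) : String :=
  String.ofList (((PySem.List.sorted egyptDict.keys (fun x => x) true).foldl
      egyptStep ([], arabic_num)).1)

-- ===== PORT B =====
def arabic_to_egyptian_alt (arabic_num : Int) : String :=
  if arabic_num < 1 then "" else
    let q := PySem.Int.floordiv arabic_num 9
    let r := PySem.Int.mod arabic_num 9
    String.ofList ((List.replicate q.toNat "-||||".toList).flatten ++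
      PySem.List.pyGetD [[], "|".toList, "||".toList, "|||".toList, "||||".toList,
                         "-".toList, "-|".toList, "-||".toList, "-|||".toList] r [])

-- ===== PRECONDITION & SPEC =====
def Spec_arabic_to_egyptian (arabic_num : Int) (out : String) : Prop := out = arabic_to_egyptian_alt arabic_num
instance (arabic_num : Int) (out : String) : Decidable (Spec_arabic_to_egyptian arabic_num out) := by unfold Spec_arabic_to_egyptian; infer_instance

-- ===== CLAIM (what is proved, stated in full; the proofs are below) =====
def Claim_equal_arabic_to_egyptian : Prop := ∀ (arabic_num : Int), Dom_arabic_to_egyptian arabic_num → Spec_arabic_to_egyptian arabic_num (arabic_to_egyptian arabic_num)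

-- ===== LEMMAS AND PROOFS =====

-- the character-list bodies of the two ports
def Achars (n : Int) : List Char :=
  ((PySem.List.sorted egyptDict.keys (fun x => x) true).foldl egyptStep ([], n)).1

def Bchars (n : Int) : List Char :=
  if n < 1 then [] else
    (List.replicate (PySem.Int.floordiv n 9).toNat "-||||".toList).flatten ++
      PySem.List.pyGetD [[], "|".toList, "||".toList, "|||".toList, "||||".toList,
                         "-".toList, "-|".toList, "-||".toList, "-|||".toList]
        (PySem.Int.mod n 9) []

lemma sortedKeys_eval :
    PySem.List.sorted egyptDict.keys (fun x => x) true = [9, 8, 7, 6, 5, 4, 3, 2, 1] := by decide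

lemma egyptWhile_stop {v n : Int} (h : n < v) (f : Nat) (s acc : List Char) :
    egyptWhile f v s acc n = (acc, n) := by
  cases f with
  | zero => rfl
  | succ f => simp [egyptWhile, not_le.mpr h]

lemma egyptWhile_acc (f : Nat) (v : Int) (s : List Char) :
    ∀ (acc : List Char) (n : Int),
      egyptWhile f v s acc n
        = (acc ++ (egyptWhile f v s [] n).1, (egyptWhile f v s [] n).2) := by
  induction f with
  | zero => intro acc n; simp [egyptWhile]
  | succ f ih =>
      intro acc n
      by_cases h : v ≤ n
      · simp only [egyptWhile, if_pos h]
        rw [ih (acc ++ s), ih ([] ++ s)]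
        simp [List.append_assoc]
      · simp [egyptWhile, h]

lemma egyptWhile_fuel {v : Int} (hv : 1 ≤ v) :
    ∀ (f f' : Nat) (n : Int), n.toNat ≤ f → n.toNat ≤ f' →
      ∀ (s acc : List Char), egyptWhile f v s acc n = egyptWhile f' v s acc n := by
  intro f
  induction f with
  | zero =>
      intro f' n hf hf' s acc
      have hn : n < v := by omega
      rw [egyptWhile_stop hn, egyptWhile_stop hn]
  | succ f ih =>
      intro f' n hf hf' s acc
      by_cases h : v ≤ n
      · cases f' with
        | zero => omega
        | succ f'' =>
            simp only [egyptWhile, if_pos h]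
            exact ih f'' (n - v) (by omega) (by omega) s (acc ++ s)
      · have hn : n < v := by omega
        rw [egyptWhile_stop hn, egyptWhile_stop hn]

lemma foldl_egyptStep_acc (vals : List Int) (hv : ∀ v ∈ vals, 1 ≤ v) :
    ∀ (st : List Char × Int),
      vals.foldl egyptStep st
        = (st.1 ++ (vals.foldl egyptStep ([], st.2)).1, (vals.foldl egyptStep ([], st.2)).2) := by
  induction vals with
  | nil => intro st; simp
  | cons v vs ih =>
      intro st
      simp only [List.foldl_cons]
      have h1 : egyptStep st v
          = (st.1 ++ (egyptStep ([], st.2) v).1, (egyptStep ([], st.2) v).2) := by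
        simp only [egyptStep]
        exact egyptWhile_acc _ _ _ st.1 st.2
      rw [h1]
      have hvs : ∀ u ∈ vs, 1 ≤ u := fun u hu => hv u (List.mem_cons_of_mem _ hu)
      rw [ih hvs (st.1 ++ (egyptStep ([], st.2) v).1, (egyptStep ([], st.2) v).2),
          ih hvs (egyptStep ([], st.2) v)]
      simp [List.append_assoc]

lemma Achars_nonpos {n : Int} (h : n ≤ 0) : Achars n = [] := by
  have h9 : n < 9 := by omega
  simp only [Achars, sortedKeys_eval, List.foldl_cons, List.foldl_nil, egyptStep]
  rw [egyptWhile_stop (by omega : n < 9), egyptWhile_stop (by omega : n < 8),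
      egyptWhile_stop (by omega : n < 7), egyptWhile_stop (by omega : n < 6),
      egyptWhile_stop (by omega : n < 5), egyptWhile_stop (by omega : n < 4),
      egyptWhile_stop (by omega : n < 3), egyptWhile_stop (by omega : n < 2),
      egyptWhile_stop (by omega : n < 1)]

lemma Achars_rec {n : Int} (h : 9 ≤ n) :
    Achars n = "-||||".toList ++ Achars (n - 9) := by
  have hstep : egyptStep ([], n) 9
      = ("-||||".toList ++ (egyptStep ([], n - 9) 9).1, (egyptStep ([], n - 9) 9).2) := by
    simp only [egyptStep]
    have hfuel : n.toNat = (n.toNat - 1) + 1 := by omega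
    rw [hfuel]
    simp only [egyptWhile, if_pos h, List.nil_append]
    rw [egyptWhile_fuel (by omega : (1:Int) ≤ 9) (n.toNat - 1) (n - 9).toNat (n - 9)
          (by omega) (by omega)]
    exact egyptWhile_acc _ _ _ _ _
  have hrest : ∀ v ∈ [(8:Int), 7, 6, 5, 4, 3, 2, 1], 1 ≤ v := by decide
  have e1 : Achars n = ([(8:Int), 7, 6, 5, 4, 3, 2, 1].foldl egyptStep (egyptStep ([], n) 9)).1 := by
    simp only [Achars, sortedKeys_eval, List.foldl_cons]
  have e2 : Achars (n - 9)
      = ([(8:Int), 7, 6, 5, 4, 3, 2, 1].foldl egyptStep (egyptStep ([], n - 9) 9)).1 := by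
    simp only [Achars, sortedKeys_eval, List.foldl_cons]
  rw [e1, e2, hstep,
      foldl_egyptStep_acc [8, 7, 6, 5, 4, 3, 2, 1] hrest
        ("-||||".toList ++ (egyptStep ([], n - 9) 9).1, (egyptStep ([], n - 9) 9).2),
      foldl_egyptStep_acc [8, 7, 6, 5, 4, 3, 2, 1] hrest (egyptStep ([], n - 9) 9)]
  simp

lemma Bchars_rec {n : Int} (h : 9 ≤ n) :
    Bchars n = "-||||".toList ++ Bchars (n - 9) := by
  have hd : PySem.Int.floordiv n 9 = n / 9 := PySem.Int.floordiv_eq_ediv_of_pos (by omega)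
  have hd' : PySem.Int.floordiv (n - 9) 9 = (n - 9) / 9 :=
    PySem.Int.floordiv_eq_ediv_of_pos (by omega)
  have hm : PySem.Int.mod n 9 = n % 9 := PySem.Int.mod_eq_emod_of_pos (by omega)
  have hm' : PySem.Int.mod (n - 9) 9 = (n - 9) % 9 := PySem.Int.mod_eq_emod_of_pos (by omega)
  by_cases h9 : n - 9 < 1
  · have hn : n = 9 := by omega
    subst hn
    decide
  · have hq : (n / 9).toNat = ((n - 9) / 9).toNat + 1 := by omega
    have hr : n % 9 = (n - 9) % 9 := by omega
    simp only [Bchars, if_neg (by omega : ¬ n < 1), if_neg h9, hd, hd', hm, hm', hq, hr,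
      List.replicate_succ, List.flatten_cons, List.append_assoc]

lemma chars_eq : ∀ (k : Nat) (n : Int), n.toNat ≤ k → Achars n = Bchars n := by
  intro k
  induction k with
  | zero =>
      intro n hn
      have h0 : n ≤ 0 := by omega
      rw [Achars_nonpos h0]
      simp [Bchars, if_pos (by omega : n < 1)]
  | succ k ih =>
      intro n hn
      by_cases h0 : n ≤ 0
      · rw [Achars_nonpos h0]; simp [Bchars, if_pos (by omega : n < 1)]
      · by_cases h9 : n < 9
        · interval_cases n <;> decide
        · rw [Achars_rec (by omega), Bchars_rec (by omega), ih (n - 9) (by omega)]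

-- ===== VERDICT (by name: the statement is the Claim_ definition above) =====
theorem arabic_to_egyptian_spec : Claim_equal_arabic_to_egyptian := by
  intro n _
  show arabic_to_egyptian n = arabic_to_egyptian_alt n
  have hA : arabic_to_egyptian n = String.ofList (Achars n) := rfl
  have hB : arabic_to_egyptian_alt n = String.ofList (Bchars n) := by
    simp only [arabic_to_egyptian_alt, Bchars]
    split_ifs with h <;> rfl
  rw [hA, hB, chars_eq n.toNat n (le_refl _)]
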